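-- pv_equiv track=rewrite | github.com/sangii99/syoon | files sets tuples dicts/Doubles test.py | double2
-- ===== SOURCE A (Python) =====
-- def double2(nums2):
--     nums_count = {}
--     for num in nums2:
--         if num in nums_count:
--             nums_count[num] += 1
--         else:
--             nums_count[num] = 1
--     set1 = set()
--     set2 = set()
--     for num in nums_count:
--         if nums_count[num] >= 2:
--             set2.add(num)
--         else:
--             set1.add(num)
--     return tuple((set1, set2))
-- ===== SOURCE B (Python) =====
-- def double2(nums2):
--     # Sort a copy; equal adjacent pairs mark exactly the duplicated values.
--     s = sorted(nums2)
--     dups = {a for a, b in zip(s, s[1:]) if a == b}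
--     distinct = list(dict.fromkeys(nums2))
--     return ({x for x in distinct if x not in dups},
--             {x for x in distinct if x in dups})
-- ===== Notes on version B (the rewrite author's own statement) =====
-- stated objective: alternative
-- what changed: Replaced the hand-built count dictionary and the two-set partitioning loop by sort-then-adjacent-equal detection of the duplicated values, then a membership split of the first-occurrence distinct list.
import Mathlib
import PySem

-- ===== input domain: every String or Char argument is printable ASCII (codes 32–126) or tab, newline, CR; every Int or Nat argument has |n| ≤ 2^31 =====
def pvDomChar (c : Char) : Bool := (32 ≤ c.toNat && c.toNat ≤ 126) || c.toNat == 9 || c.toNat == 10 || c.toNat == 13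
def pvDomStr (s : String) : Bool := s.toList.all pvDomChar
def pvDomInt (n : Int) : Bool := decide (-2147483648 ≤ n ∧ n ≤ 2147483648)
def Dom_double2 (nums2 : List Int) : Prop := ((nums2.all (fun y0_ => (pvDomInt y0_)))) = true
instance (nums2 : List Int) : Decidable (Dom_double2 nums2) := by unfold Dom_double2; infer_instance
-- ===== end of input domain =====

-- B replaces A's hand-built count dictionary and two-set partitioning loop by sorting a copy,
-- reading the duplicated values off equal adjacent pairs, and splitting the first-occurrence
-- distinct list by membership in that duplicate set (objective: alternative).
-- Python returns a pair of sets; both ports list each set's elements in first-occurrence order.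

-- ===== PORT A =====
def double2 (nums2 : List Int) : List Int × List Int :=
  -- nums_count = {}; for num in nums2: count occurrences
  let nums_count : PySem.Dict Int Int :=
    nums2.foldl (fun d num =>
      if d.contains num then d.insert num (d.getD num 0 + 1) else d.insert num 1)
      PySem.Dict.empty
  -- for num in nums_count: partition keys by count ≥ 2
  -- (nums_count[num] is always present here, so getD is exact)
  let p :=
    nums_count.keys.foldl (fun (p : List Int × List Int) num =>
      if 2 ≤ nums_count.getD num 0 then (p.1, PySem.Set.add p.2 num)
      else (PySem.Set.add p.1 num, p.2)) ([], [])
  (p.1, p.2)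

-- ===== PORT B =====
def double2_alt (nums2 : List Int) : List Int × List Int :=
  -- s = sorted(nums2); dups = {a for a, b in zip(s, s[1:]) if a == b}
  let s := PySem.List.sorted nums2 (fun x => x) false
  let dups := PySem.Set.ofList
    (((s.zip (PySem.List.slice s (some 1) none)).filter (fun p => p.1 == p.2)).map (fun p => p.1))
  -- distinct = list(dict.fromkeys(nums2)); two membership-filtered set comprehensions
  let distinct := PySem.List.dedup nums2
  (PySem.Set.ofList (distinct.filter (fun x => !(PySem.Set.contains dups x))),
   PySem.Set.ofList (distinct.filter (fun x => PySem.Set.contains dups x)))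

-- ===== PRECONDITION & SPEC =====
def Spec_double2 (nums2 : List Int) (out : List Int × List Int) : Prop := out = double2_alt nums2
instance (nums2 : List Int) (out : List Int × List Int) : Decidable (Spec_double2 nums2 out) := by unfold Spec_double2; infer_instance

-- ===== CLAIM (what is proved, stated in full; the proofs are below) =====
def Claim_equal_double2 : Prop := ∀ (nums2 : List Int), Dom_double2 nums2 → Spec_double2 nums2 (double2 nums2)

-- ===== LEMMAS AND PROOFS =====

-- A's counting loop builds Counter(nums2).
theorem double2_count_eq_counter (nums2 : List Int) :
    nums2.foldl (fun d num =>
      if d.contains num then d.insert num (d.getD num 0 + 1) else d.insert num 1)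
      PySem.Dict.empty = PySem.Dict.counter nums2 := by
  rw [← PySem.Dict.foldl_insert_getD_add_one_eq_counter]
  congr 1
  funext d num
  by_cases h : d.contains num = true
  · simp [h]
  · simp [h, PySem.Dict.getD_of_not_contains d 0 (by simpa using h)]

-- A's partitioning loop over a nodup list of fresh keys is a pair of filters.
theorem foldl_partition (c : Int → Int) :
    ∀ (l s1 s2 : List Int), l.Nodup → (∀ k ∈ l, k ∉ s1) → (∀ k ∈ l, k ∉ s2) →
    l.foldl (fun (p : List Int × List Int) num =>
      if 2 ≤ c num then (p.1, PySem.Set.add p.2 num)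
      else (PySem.Set.add p.1 num, p.2)) (s1, s2)
    = (s1 ++ l.filter (fun k => !decide (2 ≤ c k)),
       s2 ++ l.filter (fun k => decide (2 ≤ c k))) := by
  intro l
  induction l with
  | nil => intro s1 s2 _ _ _; simp
  | cons x xs ih =>
    intro s1 s2 hnd h1 h2
    have hx1 : x ∉ s1 := h1 x (by simp)
    have hx2 : x ∉ s2 := h2 x (by simp)
    have hnd' : xs.Nodup := hnd.of_cons
    have hxxs : x ∉ xs := (List.nodup_cons.mp hnd).1
    by_cases hc : 2 ≤ c x
    · simp only [List.foldl_cons, if_pos hc]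
      rw [PySem.Set.add_of_not_mem hx2,
        ih s1 (s2 ++ [x]) hnd' (fun k hk => h1 k (by simp [hk]))
          (fun k hk => by
            simp only [List.mem_append, List.mem_singleton]
            rintro (h | rfl)
            · exact h2 k (by simp [hk]) h
            · exact hxxs hk)]
      simp [hc]
    · simp only [List.foldl_cons, if_neg hc]
      rw [PySem.Set.add_of_not_mem hx1,
        ih (s1 ++ [x]) s2 hnd'
          (fun k hk => by
            simp only [List.mem_append, List.mem_singleton]
            rintro (h | rfl)
            · exact h1 k (by simp [hk]) h
            · exact hxxs hk)
          (fun k hk => h2 k (by simp [hk]))]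
      simp [hc]

-- In a (≤)-sorted list, a value occurs twice iff it forms an equal adjacent pair.
theorem adj_pair_iff (x : Int) : ∀ (s : List Int), s.Pairwise (· ≤ ·) →
    ((x, x) ∈ s.zip s.tail ↔ 2 ≤ s.count x) := by
  intro s
  induction s with
  | nil => simp
  | cons a t ih =>
    intro hp
    cases t with
    | nil =>
      constructor
      · intro h
        simp at h
      · intro h
        have hle : ([a] : List Int).count x ≤ 1 := List.count_le_length
        omega
    | cons b t2 =>
      have hab : a ≤ b := (List.pairwise_cons.mp hp).1 b (by simp)
      have hpt : (b :: t2).Pairwise (· ≤ ·) := (List.pairwise_cons.mp hp).2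
      have hble : ∀ y ∈ b :: t2, b ≤ y := by
        intro y hy
        rcases List.mem_cons.mp hy with rfl | hy'
        · exact le_refl y
        · exact (List.pairwise_cons.mp hpt).1 y hy'
      have iht := ih hpt
      simp only [List.tail_cons] at iht ⊢
      rw [List.zip_cons_cons]
      constructor
      · intro hm
        rcases List.mem_cons.mp hm with heq | hm'
        · rw [Prod.mk.injEq] at heq
          obtain ⟨hxa, hxb⟩ := heq
          have h1 : 0 < (b :: t2).count x := List.count_pos_iff.mpr (by rw [hxb]; simp)
          have h2 : (a :: b :: t2).count x = (b :: t2).count x + 1 := by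
            simp [List.count_cons, hxa.symm]
          omega
        · have h3 := iht.mp hm'
          have h4 : (a :: b :: t2).count x = (b :: t2).count x + if a == x then 1 else 0 :=
            List.count_cons
          have h5 : (if a == x then 1 else 0) ≤ 1 := by split <;> omega
          omega
      · intro hc
        by_cases hxa : x = a
        · have h2 : (a :: b :: t2).count x = (b :: t2).count x + 1 := by
            simp [List.count_cons, hxa.symm]
          have hxin : x ∈ b :: t2 := List.count_pos_iff.mp (by omega)
          have hbx : b ≤ x := hble x hxin
          have hxb : x = b := by omega
          exact List.mem_cons.mpr (Or.inl (by rw [Prod.mk.injEq]; exact ⟨hxa, hxb⟩))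
        · have hne : a ≠ x := fun h => hxa h.symm
          have h2 : (a :: b :: t2).count x = (b :: t2).count x := by
            simp [List.count_cons, hne]
          exact List.mem_cons.mpr (Or.inr (iht.mpr (by omega)))

-- ===== VERDICT (by name: the statement is the Claim_ definition above) =====
theorem double2_spec : Claim_equal_double2 := by
  intro nums2 _
  simp only [Spec_double2, double2, double2_alt]
  rw [double2_count_eq_counter, PySem.Dict.keys_counter,
    foldl_partition (fun k => (PySem.Dict.counter nums2).getD k 0)
      (PySem.Set.ofList nums2) [] [] (PySem.Set.nodup_ofList nums2) (by simp) (by simp)]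
  rw [PySem.List.slice_from_one]
  set s := PySem.List.sorted nums2 (fun x => x) false with hs
  set L := ((s.zip s.tail).filter (fun p => p.1 == p.2)).map (fun p => p.1) with hL
  have hsort : s.Pairwise (· ≤ ·) := by
    have := PySem.List.sorted_pairwise nums2 (fun x => x)
    simpa using this
  have hperm : s.Perm nums2 := PySem.List.sorted_perm nums2 (fun x => x) false
  have hmemL : ∀ x : Int, x ∈ L ↔ (x, x) ∈ s.zip s.tail := by
    intro x
    rw [hL]
    simp only [List.mem_map, List.mem_filter]
    constructor
    · rintro ⟨⟨p1, p2⟩, ⟨hz, he⟩, rfl⟩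
      have : p1 = p2 := by simpa using he
      subst this
      exact hz
    · intro h
      exact ⟨(x, x), ⟨h, by simp⟩, rfl⟩
  have hcontains : ∀ x : Int,
      PySem.Set.contains (PySem.Set.ofList L) x = decide (2 ≤ (PySem.Dict.counter nums2).getD x 0) := by
    intro x
    have hiff : x ∈ PySem.Set.ofList L ↔ 2 ≤ nums2.count x := by
      rw [PySem.Set.mem_ofList, hmemL, adj_pair_iff x s hsort, hperm.count_eq]
    rw [PySem.Dict.getD_counter]
    by_cases h : 2 ≤ nums2.count x
    · rw [(PySem.Set.contains_iff _ _).mpr (hiff.mpr h)]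
      symm
      rw [decide_eq_true_eq]
      exact_mod_cast h
    · have h1 : PySem.Set.contains (PySem.Set.ofList L) x = false := by
        rw [Bool.eq_false_iff]
        intro hc
        exact h (hiff.mp ((PySem.Set.contains_iff _ _).mp hc))
      rw [h1]
      symm
      rw [decide_eq_false_iff_not]
      intro hc
      exact h (by exact_mod_cast hc)
  have hd : PySem.List.dedup nums2 = PySem.Set.ofList nums2 := PySem.List.dedup_eq_ofList nums2
  have hnd := PySem.Set.nodup_ofList nums2
  refine Prod.ext ?_ ?_
  · simp only [List.nil_append, hd]
    rw [PySem.Set.ofList_eq_self_of_nodup _ (hnd.filter _)]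
    exact (List.filter_congr (fun k _ => by rw [hcontains k])).symm
  · simp only [List.nil_append, hd]
    rw [PySem.Set.ofList_eq_self_of_nodup _ (hnd.filter _)]
    exact (List.filter_congr (fun k _ => by rw [hcontains k])).symm
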